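-- pv_equiv track=rewrite | github.com/PPPPParadise/Danone-international-label-advanced-forecast | src/forecaster/utilitaires.py | add_period
-- ===== SOURCE A (Python) =====
-- def add_period(date: int, add: int, highest_period: int = 12) -> int:
--     """ This function returns a week (or month) equal to date + add
--     Inputs:
--         - date: integer indicating a week number or month number
--         - add: integer indicating the number of weeks to add
--         - is_weekly_mode: boolean that indicates if the date is in week or months
--     Returns:
--         - res: the resulting operation (a new date, integer)
--     """
--
--     i = 0
--     while i < add:
--         if date % 100 != highest_period:
--             date += 1
--         else:
--             date = ((date // 100) + 1) * 100 + 1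
--         i += 1
--     return date
-- ===== SOURCE B (Python) =====
-- def add_period(date: int, add: int, highest_period: int = 12) -> int:
--     if add <= 0:
--         return date
--     if not 1 <= highest_period < 100:
--         # periods are numbered starting at 1, and the period field is date % 100
--         # (two digits), so no rollover can occur: plain addition
--         return date + add
--     to_roll = (highest_period - date % 100) % 100  # steps until the period field hits highest_period
--     if add <= to_roll:
--         return date + add
--     q, r = divmod(add - to_roll - 1, highest_period)
--     return ((date + to_roll) // 100 + 1 + q) * 100 + 1 + r
-- ===== Notes on version B (the rewrite author's own statement) =====
-- stated objective: faster
-- what changed: Replaced A's one-period-at-a-time while loop (add iterations) by an O(1) closed form (steps to the first rollover, then divmod of the remaining steps by the cycle length highest_period); Pre_ excludes highest_period = 0 with a rollover reached, where A's rollover jumps two year blocks per 100 steps -- an accident of the encoding -- while B treats the meaningless cycle length 0 as no rollover.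
-- outside the precondition, e.g. on add_period(100, 150, 0): A returns 450, B returns 250
import Mathlib
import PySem

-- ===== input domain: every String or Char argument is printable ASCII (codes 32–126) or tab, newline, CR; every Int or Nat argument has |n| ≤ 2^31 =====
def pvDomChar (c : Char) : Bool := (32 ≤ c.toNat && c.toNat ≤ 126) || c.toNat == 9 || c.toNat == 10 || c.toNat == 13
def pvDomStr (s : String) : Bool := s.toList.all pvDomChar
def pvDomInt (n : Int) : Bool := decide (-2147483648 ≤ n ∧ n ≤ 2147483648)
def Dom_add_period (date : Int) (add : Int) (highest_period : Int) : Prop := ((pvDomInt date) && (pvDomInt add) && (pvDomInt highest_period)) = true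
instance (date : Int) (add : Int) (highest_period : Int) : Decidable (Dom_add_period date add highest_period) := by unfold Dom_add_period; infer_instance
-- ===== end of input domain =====

-- B replaces A's O(add) one-step-at-a-time loop by O(1) closed-form modular arithmetic (divmod).


-- ===== PORT A =====
-- one iteration of A's while-loop body
def add_periodStep (date : Int) (highest_period : Int) : Int :=
  if PySem.Int.mod date 100 ≠ highest_period then date + 1
  else (PySem.Int.floordiv date 100 + 1) * 100 + 1

-- the while-loop 'i = 0; while i < add: …; i += 1' runs max(add,0) times
def add_periodLoop (date : Int) (highest_period : Int) : Nat → Int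
  | 0 => date
  | n + 1 => add_periodLoop (add_periodStep date highest_period) highest_period n

def add_period (date : Int) (add : Int) (highest_period : Int) : Int :=
  add_periodLoop date highest_period add.toNat

-- ===== PORT B =====
def add_period_alt (date : Int) (add : Int) (highest_period : Int) : Int :=
  if add ≤ 0 then date
  else if ¬ (1 ≤ highest_period ∧ highest_period < 100) then date + add
  else
    let to_roll := PySem.Int.mod (highest_period - PySem.Int.mod date 100) 100
    if add ≤ to_roll then date + add
    else
      let q := PySem.Int.floordiv (add - to_roll - 1) highest_period
      let r := PySem.Int.mod (add - to_roll - 1) highest_period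
      (PySem.Int.floordiv (date + to_roll) 100 + 1 + q) * 100 + 1 + r

-- ===== PRECONDITION & SPEC =====
-- Pre_ excludes highest_period = 0 with the rollover point reached: there A's rollover
-- arithmetic jumps two year blocks per 100 steps (an accident of the encoding), while B
-- treats the meaningless cycle length 0 as 'no rollover'; either value is as defensible.
def Pre_add_period (date : Int) (add : Int) (highest_period : Int) : Prop :=
  ¬ (highest_period = 0 ∧ 0 < add ∧ (0 - date) % 100 < add)
instance (date : Int) (add : Int) (highest_period : Int) : Decidable (Pre_add_period date add highest_period) := by unfold Pre_add_period; infer_instance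
def pvWitness_add_period : Int × Int × Int := (202410, 5, 12)

def Spec_add_period (date : Int) (add : Int) (highest_period : Int) (out : Int) : Prop := out = add_period_alt date add highest_period
instance (date : Int) (add : Int) (highest_period : Int) (out : Int) : Decidable (Spec_add_period date add highest_period out) := by unfold Spec_add_period; infer_instance

-- ===== CLAIM (what is proved, stated in full; the proofs are below) =====
def Claim_equal_add_period : Prop := ∀ (date : Int) (add : Int) (highest_period : Int), Dom_add_period date add highest_period → Pre_add_period date add highest_period → Spec_add_period date add highest_period (add_period date add highest_period)

-- ===== LEMMAS AND PROOFS =====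

lemma ediv_shift (a b : Int) (hb : b ≠ 0) : a / b = (a - b) / b + 1 := by
  have := Int.add_mul_ediv_right (a - b) 1 hb
  simpa using this

-- B's closed form satisfies the same one-step recurrence as A's loop (for highest_period ≠ 0)
lemma alt_step (hp : Int) (hp0 : hp ≠ 0) (n : Nat) (date : Int) :
    add_period_alt date ((n : Int) + 1) hp = add_period_alt (add_periodStep date hp) (n : Int) hp := by
  have h100 : (0:Int) < 100 := by omega
  by_cases hr : 1 ≤ hp ∧ hp < 100
  · have hpp : (0:Int) < hp := by omega
    simp only [add_period_alt, add_periodStep, PySem.Int.mod_eq_emod_of_pos h100,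
      PySem.Int.floordiv_eq_ediv_of_pos h100, PySem.Int.mod_eq_emod_of_pos hpp,
      PySem.Int.floordiv_eq_ediv_of_pos hpp]
    by_cases hph : date % 100 = hp
    · rw [hph]
      simp only [sub_self, Int.zero_emod, ne_eq, not_true_eq_false, if_false, add_zero]
      have hk' : (hp - ((date / 100 + 1) * 100 + 1) % 100) % 100 = hp - 1 := by omega
      rw [hk']
      rw [show (n : Int) + 1 - 0 - 1 = (n : Int) from by omega]
      by_cases hn : (n : Int) ≤ hp - 1
      · rw [Int.ediv_eq_zero_of_lt (by omega) (show (n : Int) < hp from by omega),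
          Int.emod_eq_of_lt (by omega) (show (n : Int) < hp from by omega)]
        split_ifs <;> omega
      · rw [show (n : Int) - (hp - 1) - 1 = (n : Int) - hp from by omega]
        rw [ediv_shift (n : Int) hp (by omega), Int.emod_eq_sub_self_emod]
        have hy : ((date / 100 + 1) * 100 + 1 + (hp - 1)) / 100 = date / 100 + 1 := by omega
        rw [hy]
        generalize ((n : Int) - hp) / hp = Q
        generalize ((n : Int) - hp) % hp = S
        split_ifs <;> omega
    · simp only [ne_eq, hph, not_false_eq_true, if_true]
      have hk' : (hp - (date + 1) % 100) % 100 = (hp - date % 100) % 100 - 1 := by omega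
      rw [hk']
      rw [show (n : Int) - ((hp - date % 100) % 100 - 1) - 1
            = (n : Int) + 1 - (hp - date % 100) % 100 - 1 from by omega]
      rw [show date + 1 + ((hp - date % 100) % 100 - 1)
            = date + (hp - date % 100) % 100 from by omega]
      generalize ((n : Int) + 1 - (hp - date % 100) % 100 - 1) / hp = Q
      generalize ((n : Int) + 1 - (hp - date % 100) % 100 - 1) % hp = S
      split_ifs <;> omega
  · simp only [add_period_alt, add_periodStep, PySem.Int.mod_eq_emod_of_pos h100,
      PySem.Int.floordiv_eq_ediv_of_pos h100]
    split_ifs <;> omega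

lemma loop_eq_alt (hp : Int) (hp0 : hp ≠ 0) (n : Nat) (date : Int) :
    add_periodLoop date hp n = add_period_alt date (n : Int) hp := by
  induction n generalizing date with
  | zero => simp [add_periodLoop, add_period_alt]
  | succ m ih =>
      have := alt_step hp hp0 m date
      simpa [add_periodLoop, Nat.cast_add] using (ih (add_periodStep date hp)).trans this.symm

-- with highest_period = 0 and no rollover reached, A's loop is n plain increments
lemma loop_hp0 (n : Nat) (date : Int) (h : (n : Int) ≤ (0 - date) % 100) :
    add_periodLoop date 0 n = date + n := by
  induction n generalizing date with
  | zero => simp [add_periodLoop]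
  | succ m ih =>
      have h100 : (0:Int) < 100 := by omega
      have hne : date % 100 ≠ 0 := by omega
      have hstep : add_periodStep date 0 = date + 1 := by
        simp [add_periodStep, PySem.Int.mod_eq_emod_of_pos, hne]
      rw [add_periodLoop, hstep, ih (date + 1) (by push_cast at h ⊢; omega)]
      push_cast; ring

-- ===== VERDICT (by name: the statement is the Claim_ definition above) =====
theorem add_period_spec : Claim_equal_add_period := by
  intro date add hp _ hpre
  unfold Spec_add_period add_period
  by_cases hle : add ≤ 0
  · have : add.toNat = 0 := Int.toNat_of_nonpos hle
    rw [this, add_periodLoop]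
    simp [add_period_alt, hle]
  · have hcast : ((add.toNat : Int)) = add := Int.toNat_of_nonneg (by omega)
    by_cases hp0 : hp = 0
    · subst hp0
      unfold Pre_add_period at hpre
      have hk : add ≤ (0 - date) % 100 := by omega
      rw [loop_hp0 add.toNat date (by rw [hcast]; exact hk), hcast]
      unfold add_period_alt
      rw [if_neg hle, if_pos (by omega)]
    · rw [loop_eq_alt hp hp0, hcast]
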